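-- pv_equiv track=rewrite | github.com/PhilippeNguyen/mtg_draft_bot | draftsimtools/bot_tester.py | is_bot_correct
-- ===== SOURCE A (Python) =====
-- def is_bot_correct(pack, pack_rank, fuzzy = False):
--     """ Checks whether or not a bot's pick matches a human's pick.
--
--     Returns a tuple of (cardname, bot_correct) for whether or not the
--     bot's top choice matched the human's choice. If fuzzy = True, then
--     instead the bot is correct if the human's choice is in bot's top 3
--     """
--     bot_correct = 0
--     human_pick = pack[0]
--     pack_rank = sorted(pack_rank, key = pack_rank.get, reverse = True)
--     if not fuzzy:
--         bot_pick = pack_rank[0]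
--         if human_pick == bot_pick:
--             bot_correct = 1
--     elif fuzzy:
--         for i in range(min(len(pack_rank), 3)):
--             bot_pick = pack_rank[i]
--             if human_pick == bot_pick:
--                 bot_correct = 1
--     return (human_pick, bot_correct)
-- ===== SOURCE B (Python) =====
-- def is_bot_correct(pack, pack_rank, fuzzy = False):
--     """Single pass: the human's pick is in the bot's top-k (k = 1 or 3) of the
--     stable value-descending ranking iff fewer than k entries are ranked above it:
--     entries with a larger value, plus equal-valued entries appearing earlier."""
--     human_pick = pack[0]
--     hv = pack_rank.get(human_pick)
--     if hv is None:
--         return (human_pick, 0)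
--     k = 3 if fuzzy else 1
--     rank = 0
--     seen = False
--     for card, v in pack_rank.items():
--         if card == human_pick:
--             seen = True
--         elif v > hv or (v == hv and not seen):
--             rank += 1
--     return (human_pick, 1 if rank < k else 0)
-- ===== Notes on version B (the rewrite author's own statement) =====
-- stated objective: alternative
-- what changed: Replaces sorting the whole ranking and inspecting its top entries by a single counting pass that computes how many entries are ranked above the human's pick (larger value, or equal value appearing earlier, matching the stable sort's tie-break) and compares that count with k.
import Mathlib
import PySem

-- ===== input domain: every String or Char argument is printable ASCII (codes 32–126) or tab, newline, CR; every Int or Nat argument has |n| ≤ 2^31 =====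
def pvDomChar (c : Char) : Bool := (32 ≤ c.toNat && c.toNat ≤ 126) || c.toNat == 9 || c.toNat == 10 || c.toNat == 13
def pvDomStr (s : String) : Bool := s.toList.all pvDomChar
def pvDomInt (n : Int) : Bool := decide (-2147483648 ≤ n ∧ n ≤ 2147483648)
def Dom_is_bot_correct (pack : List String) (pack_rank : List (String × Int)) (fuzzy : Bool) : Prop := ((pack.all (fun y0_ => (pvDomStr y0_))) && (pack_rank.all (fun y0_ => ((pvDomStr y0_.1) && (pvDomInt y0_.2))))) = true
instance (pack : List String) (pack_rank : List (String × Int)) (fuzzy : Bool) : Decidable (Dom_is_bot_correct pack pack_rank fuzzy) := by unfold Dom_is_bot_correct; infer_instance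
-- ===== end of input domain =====

-- B replaces A's full sort of the ranking by a single counting pass over the entries (a different algorithm of similar measured cost).


-- ===== PORT A =====
-- Literal transliteration of A: sort the ranking's keys by their value, descending
-- (Python's stable sort), then compare the human's pick with the top 1 (or top 3) entries.
-- pack_rank.get(k) is PySem.Dict.getD … 0: exact here, since every k sorted is a key of the dict.
def is_bot_correct (pack : List String) (pack_rank : List (String × Int)) (fuzzy : Bool) : String × Int :=
  let bot_correct : Int := 0
  let human_pick : String := PySem.List.pyGetD pack 0 ""  -- pack[0]; IndexError on pack = [] is excluded by Pre_
  let d : PySem.Dict String Int := PySem.Dict.mk pack_rank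
  let pr : List String := PySem.List.sorted (pack_rank.map Prod.fst) (fun k => PySem.Dict.getD d k 0) true
  if fuzzy = false then
    let bot_pick := PySem.List.pyGetD pr 0 ""  -- pack_rank[0]; IndexError on empty ranking is excluded by Pre_
    if human_pick = bot_pick then (human_pick, 1) else (human_pick, bot_correct)
  else
    let bc := (PySem.List.pyRange 0 (min (PySem.List.len pr) 3) 1).foldl
      (fun bc i =>
        let bot_pick := PySem.List.pyGetD pr i ""
        if human_pick = bot_pick then 1 else bc) bot_correct
    (human_pick, bc)

-- ===== PORT B =====
-- Literal transliteration of B (Source B): one pass counting the entries ranked above the pick.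
def is_bot_correct_alt (pack : List String) (pack_rank : List (String × Int)) (fuzzy : Bool) : String × Int :=
  let human_pick : String := PySem.List.pyGetD pack 0 ""
  match PySem.Dict.get? (PySem.Dict.mk pack_rank) human_pick with
  | none => (human_pick, 0)
  | some hv =>
    let k : Int := if fuzzy then 3 else 1
    let st := pack_rank.foldl (fun (st : Int × Bool) kv =>
        if kv.1 = human_pick then (st.1, true)
        else if hv < kv.2 ∨ (kv.2 = hv ∧ st.2 = false) then (st.1 + 1, st.2)
        else st) ((0 : Int), false)
    (human_pick, if st.1 < k then 1 else 0)

-- ===== PRECONDITION & SPEC =====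
-- Pre_ excludes (a) inputs where Python A raises IndexError (empty pack; empty pack_rank with fuzzy = False)
-- and (b) association lists with duplicate keys, which cannot faithfully represent A's dict argument
-- (Python's dict collapses them, so neither port's reading of such a list is A's behaviour).
def Pre_is_bot_correct (pack : List String) (pack_rank : List (String × Int)) (fuzzy : Bool) : Prop :=
  pack ≠ [] ∧ (pack_rank.map Prod.fst).Nodup ∧ (fuzzy = true ∨ pack_rank ≠ [])
instance (pack : List String) (pack_rank : List (String × Int)) (fuzzy : Bool) : Decidable (Pre_is_bot_correct pack pack_rank fuzzy) := by unfold Pre_is_bot_correct; infer_instance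
def pvWitness_is_bot_correct : List String × (List (String × Int)) × Bool := (["b"], [("a", 2), ("b", 1)], false)

def Spec_is_bot_correct (pack : List String) (pack_rank : List (String × Int)) (fuzzy : Bool) (out : String × Int) : Prop := out = is_bot_correct_alt pack pack_rank fuzzy
instance (pack : List String) (pack_rank : List (String × Int)) (fuzzy : Bool) (out : String × Int) : Decidable (Spec_is_bot_correct pack pack_rank fuzzy out) := by unfold Spec_is_bot_correct; infer_instance

-- ===== CLAIM (what is proved, stated in full; the proofs are below) =====
def Claim_equal_is_bot_correct : Prop := ∀ (pack : List String) (pack_rank : List (String × Int)) (fuzzy : Bool), Dom_is_bot_correct pack pack_rank fuzzy → Pre_is_bot_correct pack pack_rank fuzzy → Spec_is_bot_correct pack pack_rank fuzzy (is_bot_correct pack pack_rank fuzzy)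

-- ===== LEMMAS AND PROOFS =====

theorem insertBy_filter_eq {α κ : Type} [LinearOrder κ] (key : α → κ) (c : κ) (x : α) :
    ∀ ys : List α, ys.Pairwise (fun a b => key b ≤ key a) →
    (PySem.List.insertBy (fun a b => decide (key b < key a)) x ys).filter (fun a => decide (key a = c)) =
      if key x = c then ys.filter (fun a => decide (key a = c)) ++ [x]
      else ys.filter (fun a => decide (key a = c)) := by
  intro ys hys
  induction ys with
  | nil =>
    simp only [PySem.List.insertBy, List.filter_nil]
    by_cases hxc : key x = c <;> simp [hxc]
  | cons y ys ih =>
    rw [List.pairwise_cons] at hys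
    obtain ⟨hy, hys'⟩ := hys
    simp only [PySem.List.insertBy]
    by_cases hlt : key y < key x
    · simp only [hlt, decide_true, if_true]
      by_cases hxc : key x = c
      · have hfy : (y :: ys).filter (fun a => decide (key a = c)) = [] := by
          rw [List.filter_eq_nil_iff]
          intro a ha
          simp only [decide_eq_true_eq]
          intro h
          have hle : key a ≤ key y := by
            rcases List.mem_cons.mp ha with rfl | ha'
            · exact le_refl _
            · exact hy a ha'
          rw [h, ← hxc] at hle
          exact absurd hlt (not_lt.mpr hle)
        rw [List.filter_cons, hfy]
        simp [hxc]
      · rw [List.filter_cons]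
        simp [hxc]
    · simp only [hlt, decide_false, Bool.false_eq_true, if_false]
      rw [List.filter_cons, ih hys']
      by_cases hxc : key x = c <;> by_cases hyc : decide (key y = c) = true <;>
        simp [hxc, hyc]

theorem sorted_append_singleton {α κ : Type} [LinearOrder κ] (key : α → κ) (ys : List α) (x : α) :
    PySem.List.sorted (ys ++ [x]) key true =
      PySem.List.insertBy (fun a b => decide (key b < key a)) x (PySem.List.sorted ys key true) := by
  rw [PySem.List.sorted_rev_eq_foldl_insertBy, PySem.List.sorted_rev_eq_foldl_insertBy, List.foldl_append]
  rfl

-- stability of the reverse stable sort at key level c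
theorem sorted_rev_filter_key {α κ : Type} [LinearOrder κ] (key : α → κ) (c : κ) :
    ∀ xs ys : List α,
    (PySem.List.sorted (ys ++ xs) key true).filter (fun a => decide (key a = c)) =
      (PySem.List.sorted ys key true).filter (fun a => decide (key a = c)) ++ xs.filter (fun a => decide (key a = c)) := by
  intro xs
  induction xs with
  | nil => intro ys; simp
  | cons x xs ih =>
    intro ys
    have h1 : ys ++ x :: xs = (ys ++ [x]) ++ xs := by simp
    rw [h1, ih (ys ++ [x]), sorted_append_singleton,
      insertBy_filter_eq key c x _ (PySem.List.sorted_pairwise_rev ys key)]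
    by_cases hxc : key x = c <;> simp [hxc]

theorem sorted_rev_stable {α κ : Type} [LinearOrder κ] (key : α → κ) (c : κ) (xs : List α) :
    (PySem.List.sorted xs key true).filter (fun a => decide (key a = c)) =
      xs.filter (fun a => decide (key a = c)) := by
  have := sorted_rev_filter_key key c xs []
  simpa using this

theorem countP_or_disjoint {α : Type} (p q : α → Bool) (l : List α)
    (h : ∀ a ∈ l, ¬(p a = true ∧ q a = true)) :
    l.countP (fun a => p a || q a) = l.countP p + l.countP q := by
  induction l with
  | nil => simp
  | cons x l ih =>
    have hx := h x (by simp)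
    have ih' := ih (fun a ha => h a (by simp [ha]))
    rw [List.countP_cons, List.countP_cons, List.countP_cons, ih']
    by_cases hp : p x = true
    · by_cases hq : q x = true
      · exact absurd ⟨hp, hq⟩ hx
      · simp only [hp, hq, Bool.true_or]; simp; omega
    · by_cases hq : q x = true
      · simp only [hp, hq, Bool.false_or]; simp; omega
      · simp [hp, hq]

theorem foldB_unseen (human : String) (hv : Int) (L : List (String × Int)) :
    ∀ (r : Int), (∀ kv ∈ L, kv.1 ≠ human) →
    L.foldl (fun (st : Int × Bool) kv =>
        if kv.1 = human then (st.1, true)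
        else if hv < kv.2 ∨ (kv.2 = hv ∧ st.2 = false) then (st.1 + 1, st.2)
        else st) (r, false) =
      (r + L.countP (fun kv => decide (hv < kv.2) || decide (kv.2 = hv)), false) := by
  induction L with
  | nil => simp
  | cons kv L ih =>
    intro r h
    have h1 := h kv (by simp)
    have h' : ∀ a ∈ L, a.1 ≠ human := fun a ha => h a (by simp [ha])
    simp only [List.foldl_cons, if_neg h1]
    by_cases h2 : hv < kv.2 ∨ kv.2 = hv
    · rw [if_pos (by tauto : hv < kv.2 ∨ (kv.2 = hv ∧ True)), ih (r+1) h']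
      have hc : (decide (hv < kv.2) || decide (kv.2 = hv)) = true := by
        rcases h2 with h2 | h2 <;> simp [h2]
      simp [hc]; omega
    · rw [if_neg (by tauto : ¬(hv < kv.2 ∨ (kv.2 = hv ∧ True))), ih r h']
      have hc : (decide (hv < kv.2) || decide (kv.2 = hv)) = false := by
        simp only [not_or] at h2; simp [h2.1, h2.2]
      simp [hc]

theorem foldB_seen (human : String) (hv : Int) (R : List (String × Int)) :
    ∀ (r : Int), (∀ kv ∈ R, kv.1 ≠ human) →
    R.foldl (fun (st : Int × Bool) kv =>
        if kv.1 = human then (st.1, true)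
        else if hv < kv.2 ∨ (kv.2 = hv ∧ st.2 = false) then (st.1 + 1, st.2)
        else st) (r, true) =
      (r + R.countP (fun kv => decide (hv < kv.2)), true) := by
  induction R with
  | nil => simp
  | cons kv R ih =>
    intro r h
    have h1 := h kv (by simp)
    have h' : ∀ a ∈ R, a.1 ≠ human := fun a ha => h a (by simp [ha])
    simp only [List.foldl_cons, if_neg h1]
    by_cases h2 : hv < kv.2
    · rw [if_pos (by tauto : hv < kv.2 ∨ (kv.2 = hv ∧ (true = false))), ih (r+1) h']
      simp [h2]; omega
    · rw [if_neg (by tauto : ¬(hv < kv.2 ∨ (kv.2 = hv ∧ (true = false)))), ih r h']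
      simp [h2]

theorem mark_fold {α : Type} [DecidableEq α] (human : α) (d : α) (s : List α) :
    ∀ n, n ≤ s.length → ∀ (b : Int),
    (List.range n).foldl (fun bc i => if human = s.getD i d then 1 else bc) b =
      if human ∈ s.take n then 1 else b := by
  intro n
  induction n with
  | zero => intro _ b; simp
  | succ n ih =>
    intro hn b
    rw [List.range_succ, List.foldl_append, ih (by omega) b]
    simp only [List.foldl_cons, List.foldl_nil]
    have hlt : n < s.length := by omega
    have hgd : s.getD n d = s[n] := List.getD_eq_getElem s d hlt
    have htake : s.take (n+1) = s.take n ++ [s[n]] := by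
      rw [List.take_add_one]
      simp [List.getElem?_eq_getElem hlt]
    rw [htake, hgd]
    by_cases h2 : human = s[n]
    · rw [if_pos h2, if_pos (List.mem_append.mpr (Or.inr (by rw [h2]; exact List.mem_singleton_self _)))]
    · rw [if_neg h2]
      by_cases h1 : human ∈ s.take n
      · rw [if_pos h1, if_pos (List.mem_append.mpr (Or.inl h1))]
      · rw [if_neg h1, if_neg (by
          intro hm
          rcases List.mem_append.mp hm with hm | hm
          · exact h1 hm
          · exact h2 (List.mem_singleton.mp hm))]

theorem prefix_of_unique {α : Type} (x : α) :
    ∀ (a c b dl : List α), a ++ x :: b = c ++ x :: dl → x ∉ a → x ∉ c → a = c := by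
  intro a
  induction a with
  | nil =>
    intro c b dl h _ hc
    cases c with
    | nil => rfl
    | cons y c =>
      simp only [List.nil_append, List.cons_append, List.cons.injEq] at h
      exact absurd (h.1 ▸ List.mem_cons_self) hc
  | cons y a ih =>
    intro c b dl h ha hc
    cases c with
    | nil =>
      simp only [List.cons_append, List.nil_append, List.cons.injEq] at h
      exact absurd (h.1 ▸ List.mem_cons_self) ha
    | cons z c =>
      simp only [List.cons_append, List.cons.injEq] at h
      obtain ⟨rfl, h2⟩ := h
      rw [ih c b dl h2 (fun hm => ha (List.mem_cons_of_mem _ hm)) (fun hm => hc (List.mem_cons_of_mem _ hm))]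

theorem mem_take_split {α : Type} [DecidableEq α] (x : α) (P Q : List α) (hx : x ∉ P) (n : ℕ) :
    x ∈ (P ++ x :: Q).take n ↔ P.length < n := by
  constructor
  · intro h
    by_contra hn
    push Not at hn
    rw [List.take_append_of_le_length (by omega)] at h
    exact hx (List.mem_of_mem_take h)
  · intro h
    rw [List.take_append]
    refine List.mem_append.mpr (Or.inr ?_)
    cases hm : n - P.length with
    | zero => omega
    | succ m => simp

theorem get?_mk_of_nodup (l : List (String × Int)) (hnd : (l.map Prod.fst).Nodup) :
    ∀ kv ∈ l, (PySem.Dict.mk l).get? kv.1 = some kv.2 := by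
  induction l with
  | nil => simp
  | cons hd tl ih =>
    intro kv hm
    rw [PySem.Dict.get?_mk_cons]
    rcases List.mem_cons.mp hm with rfl | hm'
    · simp
    · simp only [List.map_cons, List.nodup_cons] at hnd
      have hne : hd.1 ≠ kv.1 := by
        intro he
        exact hnd.1 (he ▸ List.mem_map_of_mem hm')
      rw [if_neg (by simp [hne])]
      exact ih hnd.2 kv hm'

theorem rank_eq (pack_rank L R : List (String × Int)) (human : String) (hv : Int)
    (hsplit : pack_rank = L ++ (human, hv) :: R)
    (hnodup : (pack_rank.map Prod.fst).Nodup) :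
    ∃ P Q : List String,
      PySem.List.sorted (pack_rank.map Prod.fst)
        (fun k => PySem.Dict.getD (PySem.Dict.mk pack_rank) k 0) true = P ++ human :: Q ∧
      human ∉ P ∧
      P.length = L.countP (fun kv => decide (hv < kv.2) || decide (kv.2 = hv))
               + R.countP (fun kv => decide (hv < kv.2)) := by
  set keyf : String → Int := fun k => PySem.Dict.getD (PySem.Dict.mk pack_rank) k 0 with hkeyf_def
  set keys : List String := pack_rank.map Prod.fst with hkeys_def
  set s : List String := PySem.List.sorted keys keyf true with hs_def
  have hkeyf : ∀ kv ∈ pack_rank, keyf kv.1 = kv.2 := by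
    intro kv hm
    simp only [hkeyf_def, PySem.Dict.getD, get?_mk_of_nodup pack_rank hnodup kv hm, Option.getD_some]
  have hmem : (human, hv) ∈ pack_rank := by rw [hsplit]; simp
  have hhv : keyf human = hv := hkeyf (human, hv) hmem
  have hkeys_split : keys = L.map Prod.fst ++ human :: R.map Prod.fst := by
    rw [hkeys_def, hsplit]; simp
  have hhuman_keys : human ∈ keys := by rw [hkeys_split]; simp
  have hperm : s.Perm keys := PySem.List.sorted_perm keys keyf true
  have hsnd : s.Nodup := (hperm.nodup_iff).mpr hnodup
  have hhuman_s : human ∈ s := (PySem.List.mem_sorted keys keyf true human).mpr hhuman_keys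
  obtain ⟨P, Q, hPQ⟩ := List.append_of_mem hhuman_s
  have hnodup' := hsnd
  rw [hPQ] at hnodup'
  have hPn : human ∉ P := by
    intro hc
    exact (List.disjoint_of_nodup_append hnodup') hc List.mem_cons_self
  have hpw := PySem.List.sorted_pairwise_rev keys keyf
  rw [← hs_def, hPQ] at hpw
  have hpw' := List.pairwise_append.mp hpw
  have hPge : ∀ p ∈ P, hv ≤ keyf p := by
    intro p hp
    have := hpw'.2.2 p hp human List.mem_cons_self
    rwa [hhv] at this
  have hQle : ∀ q ∈ Q, keyf q ≤ hv := by
    intro q hq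
    have := (List.pairwise_cons.mp hpw'.2.1).1 q hq
    rwa [hhv] at this
  have hnodupkeys := hnodup
  rw [hkeys_split] at hnodupkeys
  have hLn : human ∉ L.map Prod.fst := by
    intro hc
    exact (List.disjoint_of_nodup_append hnodupkeys) hc List.mem_cons_self
  refine ⟨P, Q, hPQ, hPn, ?_⟩
  have hlen : P.length = P.countP (fun a => decide (hv < keyf a) || decide (keyf a = hv)) := by
    symm
    rw [List.countP_eq_length]
    intro a ha
    rcases lt_or_eq_of_le (hPge a ha) with h | h
    · simp [h]
    · simp [h.symm]
  have hsplitP : P.countP (fun a => decide (hv < keyf a) || decide (keyf a = hv)) =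
      P.countP (fun a => decide (hv < keyf a)) + P.countP (fun a => decide (keyf a = hv)) := by
    apply countP_or_disjoint
    intro a _ h
    obtain ⟨h1, h2⟩ := h
    simp only [decide_eq_true_eq] at h1 h2
    omega
  have hPgt : P.countP (fun a => decide (hv < keyf a)) = keys.countP (fun a => decide (hv < keyf a)) := by
    have h1 := List.Perm.countP_eq (fun a => decide (hv < keyf a)) hperm
    rw [hPQ] at h1
    rw [List.countP_append, List.countP_cons] at h1
    have h2 : Q.countP (fun a => decide (hv < keyf a)) = 0 := by
      rw [List.countP_eq_zero]
      intro q hq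
      have := hQle q hq
      simp
      omega
    rw [h2] at h1
    simp [hhv] at h1
    omega
  have hgt_trans : keys.countP (fun a => decide (hv < keyf a)) =
      L.countP (fun kv => decide (hv < kv.2)) + R.countP (fun kv => decide (hv < kv.2)) := by
    rw [hkeys_def, List.countP_map]
    have hcg : pack_rank.countP ((fun a => decide (hv < keyf a)) ∘ Prod.fst) =
        pack_rank.countP (fun kv => decide (hv < kv.2)) := by
      apply List.countP_congr
      intro kv hm
      simp only [Function.comp_apply, decide_eq_true_eq, hkeyf kv hm]
    rw [hcg, hsplit, List.countP_append, List.countP_cons]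
    simp
  have hstab := sorted_rev_stable keyf hv keys
  rw [← hs_def, hPQ, hkeys_split] at hstab
  rw [List.filter_append, List.filter_append, List.filter_cons, List.filter_cons] at hstab
  rw [if_pos (by simp [hhv]), if_pos (by simp [hhv])] at hstab
  have hPfil : P.filter (fun a => decide (keyf a = hv)) = (L.map Prod.fst).filter (fun a => decide (keyf a = hv)) := by
    apply prefix_of_unique human _ _ _ _ hstab
    · intro hc; exact hPn (List.mem_of_mem_filter hc)
    · intro hc; exact hLn (List.mem_of_mem_filter hc)
  have hPeq : P.countP (fun a => decide (keyf a = hv)) = L.countP (fun kv => decide (kv.2 = hv)) := by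
    rw [List.countP_eq_length_filter, hPfil, ← List.countP_eq_length_filter, List.countP_map]
    apply List.countP_congr
    intro kv hm
    have hk : keyf kv.1 = kv.2 := hkeyf kv (by rw [hsplit]; simp [hm])
    simp only [Function.comp_apply, decide_eq_true_eq, hk]
  have hLor : L.countP (fun kv => decide (hv < kv.2) || decide (kv.2 = hv)) =
      L.countP (fun kv => decide (hv < kv.2)) + L.countP (fun kv => decide (kv.2 = hv)) := by
    apply countP_or_disjoint
    intro a _ h
    obtain ⟨h1, h2⟩ := h
    simp only [decide_eq_true_eq] at h1 h2
    omega
  rw [hlen, hsplitP, hPgt, hgt_trans, hPeq, hLor]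
  omega

-- the main equivalence, stated over the raw ports
theorem ports_agree (pack : List String) (pack_rank : List (String × Int)) (fuzzy : Bool)
    (hnodup : (pack_rank.map Prod.fst).Nodup)
    (hor : fuzzy = true ∨ pack_rank ≠ []) :
    is_bot_correct pack pack_rank fuzzy = is_bot_correct_alt pack pack_rank fuzzy := by
  simp only [is_bot_correct, is_bot_correct_alt]
  set human : String := PySem.List.pyGetD pack 0 "" with hhum
  set keyf : String → Int := fun k => PySem.Dict.getD (PySem.Dict.mk pack_rank) k 0 with hkeyf_def
  set keys : List String := pack_rank.map Prod.fst with hkeys_def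
  set s : List String := PySem.List.sorted keys keyf true with hs_def
  cases hget : PySem.Dict.get? (PySem.Dict.mk pack_rank) human with
  | none =>
    have hno : ∀ kv ∈ pack_rank, kv.1 ≠ human := by
      intro kv hm he
      simp only [PySem.Dict.get?, Option.map_eq_none_iff] at hget
      have := List.find?_eq_none.mp hget kv hm
      simp [he] at this
    have hnos : human ∉ s := by
      intro hc
      have hk := (PySem.List.mem_sorted keys keyf true human).mp hc
      obtain ⟨kv, hm, he⟩ := List.mem_map.mp hk
      exact hno kv hm he
    cases fuzzy with
    | false =>
      have hprne : pack_rank ≠ [] := by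
        rcases hor with h | h
        · exact absurd h (by simp)
        · exact h
      simp only [if_true]
      cases hs : s with
      | nil =>
        rw [hs_def, PySem.List.sorted_eq_nil_iff, hkeys_def, List.map_eq_nil_iff] at hs
        exact absurd hs hprne
      | cons y t =>
        have hy : y ∈ s := by rw [hs]; exact List.mem_cons_self
        rw [PySem.List.pyGetD_zero_cons]
        rw [if_neg (fun he => hnos (by rw [he]; exact hy))]
    | true =>
      simp only [Bool.true_eq_false, if_false]
      have hmin : (min (PySem.List.len s) 3 : Int) = ((min s.length 3 : ℕ) : Int) := by
        rw [PySem.List.len_eq]; omega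
      rw [hmin, PySem.List.pyRange_zero_natCast, List.foldl_map]
      simp only [PySem.List.pyGetD_natCast]
      rw [show (fun (bc : Int) (k : ℕ) => if human = s.getD k "" then (1 : Int) else bc) =
            (fun bc i => if human = s.getD i "" then 1 else bc) from rfl]
      rw [mark_fold human "" s (min s.length 3) (min_le_left _ _) 0]
      rw [if_neg (fun hc => hnos (List.mem_of_mem_take hc))]
  | some hv =>
    -- locate the human's entry
    have hfind : pack_rank.find? (fun p => p.1 == human) = some (human, hv) ∧
        ∃ L R, pack_rank = L ++ (human, hv) :: R ∧ ∀ a ∈ L, a.1 ≠ human := by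
      simp only [PySem.Dict.get?, Option.map_eq_some_iff] at hget
      obtain ⟨pr, hf, hv2⟩ := hget
      obtain ⟨hp, L, R, hsp, hL⟩ := List.find?_eq_some_iff_append.mp hf
      have hpr1 : pr.1 = human := by simpa using hp
      have hpr : pr = (human, hv) := by
        cases pr; simp_all
      refine ⟨by rw [← hpr]; exact hf, L, R, by rw [← hpr]; exact hsp, ?_⟩
      intro a ha he
      have := hL a ha
      simp [he] at this
    obtain ⟨hfind', L, R, hsplit, hL⟩ := hfind
    have hRn : ∀ kv ∈ R, kv.1 ≠ human := by
      have h1 : keys = L.map Prod.fst ++ human :: R.map Prod.fst := by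
        rw [hkeys_def, hsplit]; simp
      have h2 := hnodup
      rw [h1] at h2
      have h3 := (List.nodup_append.mp h2).2.1
      have h4 := (List.nodup_cons.mp h3).1
      intro kv hm he
      exact h4 (he ▸ List.mem_map_of_mem hm)
    obtain ⟨P, Q, hPQ, hPn, hPlen⟩ := rank_eq pack_rank L R human hv hsplit hnodup
    rw [← hkeys_def, ← hkeyf_def, ← hs_def] at hPQ
    -- B's fold
    have hfold : pack_rank.foldl (fun (st : Int × Bool) kv =>
        if kv.1 = human then (st.1, true)
        else if hv < kv.2 ∨ (kv.2 = hv ∧ st.2 = false) then (st.1 + 1, st.2)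
        else st) ((0 : Int), false) =
        (↑(L.countP (fun kv => decide (hv < kv.2) || decide (kv.2 = hv)))
          + ↑(R.countP (fun kv => decide (hv < kv.2))), true) := by
      rw [hsplit, List.foldl_append, foldB_unseen human hv L 0 hL]
      simp only [List.foldl_cons, if_true]
      rw [foldB_seen human hv R _ hRn]
      simp
    have hcast : (↑(L.countP (fun kv => decide (hv < kv.2) || decide (kv.2 = hv)))
          + ↑(R.countP (fun kv => decide (hv < kv.2))) : Int) = ↑P.length := by
      rw [hPlen]; push_cast; ring
    cases fuzzy with
    | false =>
      simp only [if_true, hfold, hcast]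
      have hiff : human = PySem.List.pyGetD s 0 "" ↔ P.length < 1 := by
        cases hP : P with
        | nil =>
          rw [hPQ, hP]
          simp [PySem.List.pyGetD_zero_cons]
        | cons p P' =>
          rw [hPQ, hP]
          simp only [List.cons_append, PySem.List.pyGetD_zero_cons, List.length_cons]
          constructor
          · intro he
            exact absurd (show human ∈ p :: (P' ++ human :: Q) from by rw [he]; exact List.mem_cons_self) (by rw [hP] at hPn; simp at hPn ⊢; tauto)
          · omega
      by_cases hc : human = PySem.List.pyGetD s 0 ""
      · rw [if_pos hc, if_pos (by exact_mod_cast hiff.mp hc)]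
      · rw [if_neg hc, if_neg (by
          intro h
          exact hc (hiff.mpr (by exact_mod_cast h)))]
    | true =>
      simp only [Bool.true_eq_false, if_false, hfold, hcast]
      have hmin : (min (PySem.List.len s) 3 : Int) = ((min s.length 3 : ℕ) : Int) := by
        rw [PySem.List.len_eq]; omega
      rw [hmin, PySem.List.pyRange_zero_natCast, List.foldl_map]
      simp only [PySem.List.pyGetD_natCast]
      rw [mark_fold human "" s (min s.length 3) (min_le_left _ _) 0]
      have htk : human ∈ s.take (min s.length 3) ↔ P.length < 3 := by
        have h1 : human ∈ s.take (min s.length 3) ↔ human ∈ s.take 3 := by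
          rcases Nat.le_total s.length 3 with h | h
          · rw [min_eq_left h, List.take_of_length_le (le_refl _), List.take_of_length_le h]
          · rw [min_eq_right h]
        rw [h1, hPQ, mem_take_split human P Q hPn 3]
      by_cases hc : human ∈ s.take (min s.length 3)
      · rw [if_pos hc, if_pos (by exact_mod_cast htk.mp hc)]
      · rw [if_neg hc, if_neg (by
          intro h
          exact hc (htk.mpr (by exact_mod_cast h)))]

-- ===== VERDICT (by name: the statement is the Claim_ definition above) =====
theorem is_bot_correct_spec : Claim_equal_is_bot_correct := by
  intro pack pack_rank fuzzy _ hpre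
  unfold Spec_is_bot_correct
  exact ports_agree pack pack_rank fuzzy hpre.2.1 hpre.2.2
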